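-- pv_equiv track=rewrite | github.com/azzu-sheikh/Medical-Chatbot- | Sanjeevini_Bot/bot.py | process_negation
-- ===== SOURCE A (Python) =====
-- def process_negation(user_input):
--     """
--     Remove negated phrases (e.g., 'no cold', 'not a headache')
--     and focus on affirmative statements (e.g., 'I have a fever').
--     """
--     tokens = user_input.split()
--     filtered_tokens = []
--     skip_next = False
--
--     for i, word in enumerate(tokens):
--         # Check for negation and skip the next token
--         if word in ["no", "not"] and i + 1 < len(tokens):
--             skip_next = True
--         elif skip_next:
--             skip_next = False  # Skip the negated token
--         else:
--             filtered_tokens.append(word)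
--
--     return " ".join(filtered_tokens)
-- ===== SOURCE B (Python) =====
-- def process_negation(user_input):
--     """
--     Remove negated phrases (e.g., 'no cold', 'not a headache')
--     and focus on affirmative statements (e.g., 'I have a fever').
--     Recursive descent consuming the token list in variable-sized chunks
--     (lookahead) instead of an indexed scan with a skip flag.
--     """
--     NEG = ("no", "not")
--
--     def go(ts):
--         if not ts:
--             return []
--         w, rest = ts[0], ts[1:]
--         if w in NEG and rest:
--             if rest[0] in NEG and len(rest) >= 2:
--                 # the negation word that follows is itself non-final:
--                 # it both gets dropped and negates its own successor
--                 return go(rest)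
--             return go(rest[1:])
--         return [w] + go(rest)
--
--     return " ".join(go(user_input.split()))
-- ===== Notes on version B (the rewrite author's own statement) =====
-- stated objective: alternative
-- what changed: Replaces A's indexed forward scan with a skip_next flag by a recursive descent that consumes the token list in variable-sized chunks: a non-final negation word triggers a lookahead that drops it together with its successor (or defers to a chained negation), with no indices and no mutable state.
import Mathlib
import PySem

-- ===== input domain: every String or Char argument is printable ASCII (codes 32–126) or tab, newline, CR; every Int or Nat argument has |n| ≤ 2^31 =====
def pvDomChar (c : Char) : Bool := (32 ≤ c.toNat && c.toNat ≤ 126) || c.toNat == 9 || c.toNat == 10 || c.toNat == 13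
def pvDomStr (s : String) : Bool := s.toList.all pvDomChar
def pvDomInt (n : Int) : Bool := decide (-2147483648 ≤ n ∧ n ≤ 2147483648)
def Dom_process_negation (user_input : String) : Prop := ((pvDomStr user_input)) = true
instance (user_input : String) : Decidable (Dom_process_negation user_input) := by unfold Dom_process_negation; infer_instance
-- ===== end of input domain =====

-- B replaces A's indexed scan with a skip flag by a recursive descent with lookahead; same result, different decomposition.

-- ===== PORT A =====
def process_negation (user_input : String) : String :=
  let tokens := PySem.Str.split₀ user_input
  let st := (PySem.List.enumerate tokens 0).foldl
    (fun (st : List String × Bool) iw =>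
      if (iw.2 = "no" ∨ iw.2 = "not") ∧ iw.1 + 1 < PySem.List.len tokens then
        (st.1, true)
      else if st.2 then (st.1, false)
      else (st.1 ++ [iw.2], false))
    ([], false)
  PySem.Str.join " " st.1

-- ===== PORT B =====
-- recursive helper `go` from Source B: consumes the list in chunks with lookahead
def pvGo : List String → List String
  | [] => []
  | [w] => [w]
  | w :: r0 :: rtail =>
    if w = "no" ∨ w = "not" then
      if (r0 = "no" ∨ r0 = "not") ∧ rtail ≠ [] then pvGo (r0 :: rtail)
      else pvGo rtail
    else w :: pvGo (r0 :: rtail)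

def process_negation_alt (user_input : String) : String :=
  PySem.Str.join " " (pvGo (PySem.Str.split₀ user_input))

-- ===== PRECONDITION & SPEC =====
def Spec_process_negation (user_input : String) (out : String) : Prop := out = process_negation_alt user_input
instance (user_input : String) (out : String) : Decidable (Spec_process_negation user_input out) := by unfold Spec_process_negation; infer_instance

-- ===== CLAIM (what is proved, stated in full; the proofs are below) =====
def Claim_equal_process_negation : Prop := ∀ (user_input : String), Dom_process_negation user_input → Spec_process_negation user_input (process_negation user_input)

-- ===== LEMMAS AND PROOFS =====

-- the common characterisation both ports are reduced to: keep token i iff it is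
-- not a non-final negation word and its predecessor is not a negation word
def pvKeep (tokens : List String) (iw : Int × String) : Bool :=
  !(decide (iw.2 = "no" ∨ iw.2 = "not") && decide (iw.1 + 1 < PySem.List.len tokens))
    && (decide (iw.1 = 0) || !decide (PySem.List.pyGetD tokens (iw.1 - 1) "" = "no" ∨ PySem.List.pyGetD tokens (iw.1 - 1) "" = "not"))

def pvFilt (tokens ts : List String) (k : Int) : List String :=
  ((PySem.List.enumerate ts k).filter (pvKeep tokens)).map (·.2)

set_option maxHeartbeats 1000000 in
set_option maxRecDepth 4096 in
-- loop invariant for A's fold: on the suffix starting at k (skip recording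
-- whether tokens[k-1] is a negation word) it appends exactly the kept tokens.
lemma pv_loop_eq (tokens : List String) (ts : List String) (k : Nat) (acc : List String) (skip : Bool)
    (hts : tokens.drop k = ts)
    (hskip : ts ≠ [] →
      (skip = (decide (0 < k) && decide (tokens.getD (k - 1) "" = "no" ∨ tokens.getD (k - 1) "" = "not")))) :
    ((PySem.List.enumerate ts (k : Int)).foldl
      (fun (st : List String × Bool) iw =>
        if (iw.2 = "no" ∨ iw.2 = "not") ∧ iw.1 + 1 < PySem.List.len tokens then
          (st.1, true)
        else if st.2 then (st.1, false)
        else (st.1 ++ [iw.2], false))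
      (acc, skip)).1
    = acc ++ pvFilt tokens ts (k : Int) := by
  induction ts generalizing k acc skip with
  | nil => simp [PySem.List.enumerate_nil, pvFilt]
  | cons w rest ih =>
    have hlenk : k < tokens.length := by
      have := congrArg List.length hts; simp at this; omega
    have hget0 : tokens[k]? = some w := by
      have h1 : (tokens.drop k)[0]? = some w := by rw [hts]; rfl
      simpa using h1
    have hrest : tokens.drop (k + 1) = rest := by
      have := congrArg (List.drop 1) hts
      simpa [List.drop_drop, Nat.add_comm] using this
    have hcast : ((k : Int) + 1) = ((k + 1 : Nat) : Int) := by push_cast; ring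
    simp only [pvFilt, PySem.List.enumerate_cons, List.foldl_cons, List.filter_cons]
    by_cases hneg : w = "no" ∨ w = "not"
    · by_cases hlt : (k : Int) + 1 < PySem.List.len tokens
      · -- negation word, not last: A sets skip, the token is dropped
        rw [if_pos ⟨hneg, hlt⟩]
        have hpred : pvKeep tokens ((k : Int), w) = false := by
          unfold pvKeep
          rw [decide_eq_true hneg, decide_eq_true hlt]; simp
        rw [hpred]
        simp only [Bool.false_eq_true, if_false]
        rw [hcast]
        exact ih (k + 1) acc true hrest (by intro _; simp [hget0, hneg])
      · -- negation word but last token: rest must be empty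
        rw [if_neg (by tauto)]
        have hrestnil : rest = [] := by
          by_contra hne
          have hlt2 : k + 1 < tokens.length := by
            have h2 := congrArg List.length hts
            rw [List.length_drop] at h2
            cases rest with
            | nil => exact absurd rfl hne
            | cons a b => simp at h2; omega
          exact hlt (by rw [PySem.List.len_eq]; exact_mod_cast hlt2)
        subst hrestnil
        by_cases hskipv : skip = true
        · rw [if_pos hskipv]
          have hprev := (hskip (by simp)).symm
          rw [hskipv, Bool.and_eq_true, decide_eq_true_eq, decide_eq_true_eq] at hprev
          have hpred : pvKeep tokens ((k : Int), w) = false := by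
            unfold pvKeep
            have hcast1 : ((k : Int) - 1) = ((k - 1 : Nat) : Int) := by
              have := hprev.1; omega
            rw [hcast1, PySem.List.pyGetD_natCast, decide_eq_true hprev.2]
            have hk0 : ¬ ((k : Int) = 0) := by have := hprev.1; omega
            rw [decide_eq_false hk0]
            simp only [Bool.not_true, Bool.false_or, Bool.and_false]
          rw [hpred]
          simp [PySem.List.enumerate_nil]
        · rw [if_neg hskipv]
          have hskf : skip = false := by
            cases skip
            · rfl
            · exact absurd rfl hskipv
          have hpred : pvKeep tokens ((k : Int), w) = true := by
            unfold pvKeep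
            have hlen1 : (tokens.length : Int) ≤ (k : Int) + 1 := by
              rw [PySem.List.len_eq] at hlt; omega
            by_cases hk0 : k = 0
            · subst hk0
              simp
              exact Or.inr (by exact_mod_cast hlen1)
            · have hprev := (hskip (by simp)).symm
              rw [hskf] at hprev
              have hnn : ¬ (tokens.getD (k - 1) "" = "no" ∨ tokens.getD (k - 1) "" = "not") := by
                intro h
                rw [decide_eq_true (Nat.pos_of_ne_zero hk0), decide_eq_true h] at hprev
                simp at hprev
              have hcast1 : ((k : Int) - 1) = ((k - 1 : Nat) : Int) := by
                have := Nat.pos_of_ne_zero hk0; omega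
              rw [hcast1, PySem.List.pyGetD_natCast, decide_eq_false hnn]
              simp [PySem.List.len_eq]
              exact Or.inr hlen1
          rw [hpred]
          simp [PySem.List.enumerate_nil]
    · -- not a negation word
      rw [if_neg (fun h => hneg h.1)]
      by_cases hskipv : skip = true
      · -- previous token negated this one: both drop it
        rw [if_pos hskipv]
        have hprev := (hskip (by simp)).symm
        rw [hskipv, Bool.and_eq_true, decide_eq_true_eq, decide_eq_true_eq] at hprev
        have hpred : pvKeep tokens ((k : Int), w) = false := by
          unfold pvKeep
          have hcast1 : ((k : Int) - 1) = ((k - 1 : Nat) : Int) := by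
            have := hprev.1; omega
          rw [hcast1, PySem.List.pyGetD_natCast, decide_eq_true hprev.2]
          have hk0 : ¬ ((k : Int) = 0) := by have := hprev.1; omega
          rw [decide_eq_false hk0]
          simp only [Bool.not_true, Bool.false_or, Bool.and_false]
        rw [hpred]
        simp only [Bool.false_eq_true, if_false]
        rw [hcast]
        exact ih (k + 1) acc false hrest (by intro _; simp [hget0, hneg])
      · -- kept by both
        rw [if_neg hskipv]
        have hskf : skip = false := by
            cases skip
            · rfl
            · exact absurd rfl hskipv
        have hpred : pvKeep tokens ((k : Int), w) = true := by
          unfold pvKeep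
          by_cases hk0 : k = 0
          · simp [hk0, hneg]
          · have hprev := (hskip (by simp)).symm
            rw [hskf] at hprev
            have hnn : ¬ (tokens.getD (k - 1) "" = "no" ∨ tokens.getD (k - 1) "" = "not") := by
              intro h
              rw [decide_eq_true (Nat.pos_of_ne_zero hk0), decide_eq_true h] at hprev
              simp at hprev
            have hcast1 : ((k : Int) - 1) = ((k - 1 : Nat) : Int) := by
              have := Nat.pos_of_ne_zero hk0; omega
            rw [hcast1, PySem.List.pyGetD_natCast, decide_eq_false hnn, decide_eq_false hneg]
            simp
        rw [hpred]
        simp only [if_true]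
        rw [hcast]
        rw [ih (k + 1) (acc ++ [w]) false hrest (by intro _; simp [hget0, hneg])]
        simp [pvFilt]

set_option maxHeartbeats 1000000 in
set_option maxRecDepth 4096 in
-- B's recursion on the suffix starting at k computes the same kept tokens,
-- provided a negation predecessor is only possible when the head is a chained
-- non-final negation (which is what B's recursive calls guarantee).
lemma pv_go_eq (tokens : List String) (ts : List String) (k : Nat)
    (hts : tokens.drop k = ts)
    (hprev : ts ≠ [] → 0 < k → (tokens.getD (k - 1) "" = "no" ∨ tokens.getD (k - 1) "" = "not") →
      ((ts.headD "" = "no" ∨ ts.headD "" = "not") ∧ k + 1 < tokens.length)) :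
    pvGo ts = pvFilt tokens ts (k : Int) := by
  have pvGo_cons2 : ∀ (w r0 : String) (rtail : List String),
      pvGo (w :: r0 :: rtail) =
        if w = "no" ∨ w = "not" then
          if (r0 = "no" ∨ r0 = "not") ∧ rtail ≠ [] then pvGo (r0 :: rtail) else pvGo rtail
        else w :: pvGo (r0 :: rtail) := fun _ _ _ => rfl
  match ts with
  | [] => simp [pvGo, pvFilt, PySem.List.enumerate_nil]
  | [w] =>
    have hlen : tokens.length = k + 1 := by
      have := congrArg List.length hts; simp at this; omega
    have hk1 : pvKeep tokens ((k : Int), w) = true := by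
      unfold pvKeep
      have h1 : ¬ ((k : Int) + 1 < PySem.List.len tokens) := by
        rw [PySem.List.len_eq, hlen]; push_cast; omega
      rw [decide_eq_false h1]
      by_cases hk0 : k = 0
      · simp [hk0]
      · have hpos : 0 < k := Nat.pos_of_ne_zero hk0
        have hnn : ¬ (tokens.getD (k - 1) "" = "no" ∨ tokens.getD (k - 1) "" = "not") := by
          intro h
          have := (hprev (by simp) hpos h).2
          omega
        have hcast1 : ((k : Int) - 1) = ((k - 1 : Nat) : Int) := by omega
        rw [hcast1, PySem.List.pyGetD_natCast, decide_eq_false hnn]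
        simp
    simp [pvGo, pvFilt, PySem.List.enumerate_cons, PySem.List.enumerate_nil, hk1]
  | w :: r0 :: rtail =>
    have hlen : tokens.length = k + 2 + rtail.length := by
      have := congrArg List.length hts; simp at this; omega
    have hget0 : tokens[k]? = some w := by
      have h1 : (tokens.drop k)[0]? = some w := by rw [hts]; rfl
      simpa using h1
    have hget1 : tokens[k + 1]? = some r0 := by
      have h1 : (tokens.drop k)[1]? = some r0 := by rw [hts]; rfl
      simpa using h1
    have hrest : tokens.drop (k + 1) = r0 :: rtail := by
      have := congrArg (List.drop 1) hts
      simpa [List.drop_drop, Nat.add_comm] using this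
    have hrtail : tokens.drop (k + 2) = rtail := by
      have := congrArg (List.drop 2) hts
      simpa [List.drop_drop, Nat.add_comm] using this
    have hlt : (k : Int) + 1 < PySem.List.len tokens := by
      rw [PySem.List.len_eq, hlen]; push_cast; omega
    have hgetDk : tokens.getD k "" = w := by simp [List.getD, hget0]
    have hgetDk1 : tokens.getD (k + 1) "" = r0 := by simp [List.getD, hget1]
    have hcast : ((k : Int) + 1) = ((k + 1 : Nat) : Int) := by push_cast; ring
    have hcast2 : ((k : Int) + 1 + 1) = ((k + 2 : Nat) : Int) := by push_cast; ring
    by_cases hneg : w = "no" ∨ w = "not"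
    · have hkw : pvKeep tokens ((k : Int), w) = false := by
        unfold pvKeep
        rw [decide_eq_true hneg, decide_eq_true hlt]; simp
      by_cases hc : (r0 = "no" ∨ r0 = "not") ∧ rtail ≠ []
      · have hlt2 : k + 1 + 1 < tokens.length := by
          rw [hlen]
          have : 0 < rtail.length := List.length_pos_iff.mpr hc.2
          omega
        have ihc := pv_go_eq tokens (r0 :: rtail) (k + 1) hrest
          (by intro _ _ _; exact ⟨hc.1, hlt2⟩)
        rw [pvGo_cons2, if_pos hneg, if_pos hc, ihc]
        simp only [pvFilt, PySem.List.enumerate_cons, List.filter_cons, hkw,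
          Bool.false_eq_true, if_false, hcast]
      · have hkr : pvKeep tokens ((k : Int) + 1, r0) = false := by
          unfold pvKeep
          have hk10 : ¬ ((k : Int) + 1 = 0) := by omega
          have hcast1 : ((k : Int) + 1 - 1) = ((k : Nat) : Int) := by omega
          rw [hcast1, PySem.List.pyGetD_natCast, hgetDk, decide_eq_true hneg,
            decide_eq_false hk10]
          simp
        have ihc := pv_go_eq tokens rtail (k + 2) hrtail
          (by
            intro hne _ hpneg
            exfalso
            have h21 : k + 2 - 1 = k + 1 := rfl
            rw [h21, hgetDk1] at hpneg
            exact hc ⟨hpneg, hne⟩)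
        rw [pvGo_cons2, if_pos hneg, if_neg hc, ihc]
        simp only [pvFilt, PySem.List.enumerate_cons, List.filter_cons, hkw, hkr,
          Bool.false_eq_true, if_false, hcast2]
    · have hkw : pvKeep tokens ((k : Int), w) = true := by
        unfold pvKeep
        rw [decide_eq_false hneg]
        by_cases hk0 : k = 0
        · simp [hk0]
        · have hpos : 0 < k := Nat.pos_of_ne_zero hk0
          have hnn : ¬ (tokens.getD (k - 1) "" = "no" ∨ tokens.getD (k - 1) "" = "not") := by
            intro h
            exact hneg (hprev (by simp) hpos h).1
          have hcast1 : ((k : Int) - 1) = ((k - 1 : Nat) : Int) := by omega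
          rw [hcast1, PySem.List.pyGetD_natCast, decide_eq_false hnn]
          simp
      have ihc := pv_go_eq tokens (r0 :: rtail) (k + 1) hrest
        (by
          intro _ _ hpneg
          exfalso
          rw [Nat.add_sub_cancel, hgetDk] at hpneg
          exact hneg hpneg)
      rw [pvGo_cons2, if_neg hneg, ihc]
      simp only [pvFilt, PySem.List.enumerate_cons, List.filter_cons, hkw, if_true, List.map_cons, hcast]
termination_by ts.length

-- ===== VERDICT (by name: the statement is the Claim_ definition above) =====
theorem process_negation_spec : Claim_equal_process_negation := by
  intro user_input _
  unfold Spec_process_negation process_negation process_negation_alt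
  simp only
  congr 1
  have hA := pv_loop_eq (PySem.Str.split₀ user_input) (PySem.Str.split₀ user_input) 0 [] false
    (by simp) (by intro _; simp)
  have hB := pv_go_eq (PySem.Str.split₀ user_input) (PySem.Str.split₀ user_input) 0
    (by simp) (by intro _ h; omega)
  simpa [hB] using hA
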